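-- pv_equiv track=rewrite | github.com/BCACTF/bcactf-6.0 | codebusting/solve.py | create_pattern_mask
-- ===== SOURCE A (Python) =====
-- def create_pattern_mask(text):
--     """Create a pattern mask where each unique letter is numbered"""
--     pattern = []
--     char_map = {}
--     next_id = 0
--
--     for char in text:
--         if char.isalpha():
--             if char not in char_map:
--                 char_map[char] = next_id
--                 next_id += 1
--             pattern.append(str(char_map[char]))
--         else:
--             pattern.append(char)
--
--     return ''.join(pattern)
-- ===== SOURCE B (Python) =====
-- def create_pattern_mask(text):
--     """Create a pattern mask where each unique letter is numbered"""
--     def letter_id(ch):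
--         # ID of ch = number of distinct letters strictly before its first occurrence
--         seen = set()
--         for c in text:
--             if c == ch:
--                 return len(seen)
--             if c.isalpha():
--                 seen.add(c)
--     return ''.join(str(letter_id(c)) if c.isalpha() else c for c in text)
-- ===== Notes on version B (the rewrite author's own statement) =====
-- stated objective: alternative
-- what changed: B drops A's incrementally-grown char_map entirely: each letter's ID is recomputed on demand by rescanning the text up to that letter's first occurrence and counting the distinct letters seen before it, trading A's single stateful pass with a table for a stateless quadratic rescan.
import Mathlib
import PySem

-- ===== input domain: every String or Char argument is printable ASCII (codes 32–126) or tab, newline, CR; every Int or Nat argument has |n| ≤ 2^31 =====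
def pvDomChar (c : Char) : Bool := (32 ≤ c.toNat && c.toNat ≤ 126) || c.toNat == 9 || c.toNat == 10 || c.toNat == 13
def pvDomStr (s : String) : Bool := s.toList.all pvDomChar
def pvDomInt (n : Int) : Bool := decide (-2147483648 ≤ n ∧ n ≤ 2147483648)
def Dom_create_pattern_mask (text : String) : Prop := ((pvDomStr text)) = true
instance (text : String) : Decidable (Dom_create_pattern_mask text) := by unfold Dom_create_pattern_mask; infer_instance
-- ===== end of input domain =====

-- B drops A's incrementally-grown table: each letter's ID is recomputed by rescanning the
-- text up to its first occurrence and counting the distinct letters before it (objective: alternative).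

-- ===== PORT A =====
-- A's loop body; char_map[char] is always a present key when read, ported as getD with default 0
def pvStepA (st : List String × PySem.Dict Char Int × Int) (char : Char) :
    List String × PySem.Dict Char Int × Int :=
  if PySem.Chars.isalpha char then
    let cmn := if st.2.1.contains char then (st.2.1, st.2.2)
               else (st.2.1.insert char st.2.2, st.2.2 + 1)
    (st.1 ++ [PySem.Int.toStr (cmn.1.getD char 0)], cmn.1, cmn.2)
  else
    (st.1 ++ [String.ofList [char]], st.2.1, st.2.2)

def create_pattern_mask (text : String) : String :=
  let st := text.toList.foldl pvStepA ([], PySem.Dict.empty, 0)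
  PySem.Str.join "" st.1

-- ===== PORT B =====
-- letter_id(ch): scan text, counting distinct letters into 'seen' until ch is hit;
-- returns none only if ch never occurs (unreachable at the call sites, where ch ∈ text)
def pvLetterId (ch : Char) : List Char → PySem.Set Char → Option Int
  | [], _ => none
  | c :: cs, seen =>
    if c = ch then some (PySem.Set.len seen)
    else if PySem.Chars.isalpha c then pvLetterId ch cs (PySem.Set.add seen c)
    else pvLetterId ch cs seen

def create_pattern_mask_alt (text : String) : String :=
  PySem.Str.join "" (text.toList.map (fun c =>
    if PySem.Chars.isalpha c then
      PySem.Int.toStr ((pvLetterId c text.toList PySem.Set.empty).getD 0)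
    else String.ofList [c]))

-- ===== PRECONDITION & SPEC =====
def Spec_create_pattern_mask (text : String) (out : String) : Prop := out = create_pattern_mask_alt text
instance (text : String) (out : String) : Decidable (Spec_create_pattern_mask text out) := by unfold Spec_create_pattern_mask; infer_instance

-- ===== CLAIM (what is proved, stated in full; the proofs are below) =====
def Claim_equal_create_pattern_mask : Prop := ∀ (text : String), Dom_create_pattern_mask text → Spec_create_pattern_mask text (create_pattern_mask text)

-- ===== LEMMAS AND PROOFS =====

-- the dict {s[0]: 0, s[1]: 1, …}; A's char_map after having seen letters s
def pvDictOf (s : List Char) : PySem.Dict Char Int :=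
  PySem.Dict.ofList ((PySem.List.enumerate s).map (fun p => (p.2, p.1)))

theorem pvDictOf_items (s : List Char) (h : s.Nodup) :
    (pvDictOf s).items = (PySem.List.enumerate s).map (fun p => (p.2, p.1)) := by
  show ((((PySem.List.enumerate s).map (fun p => (p.2, p.1))).foldl
      (fun d p => d.insert p.1 p.2) PySem.Dict.empty)).items = _
  rw [List.foldl_map]
  have := PySem.Dict.items_foldl_insert_fresh (PySem.List.enumerate s) (·.2) (·.1)
      PySem.Dict.empty (by simp) (by rw [PySem.List.map_snd_enumerate]; exact h)
  simpa using this

theorem pvDictOf_keys (s : List Char) (h : s.Nodup) : (pvDictOf s).keys = s := by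
  simp only [PySem.Dict.keys, pvDictOf_items s h, List.map_map]
  exact PySem.List.map_snd_enumerate s 0

theorem pvDictOf_contains (s : List Char) (h : s.Nodup) (c : Char) :
    (pvDictOf s).contains c = decide (c ∈ s) := by
  rw [PySem.Dict.contains_eq_decide_mem_keys, pvDictOf_keys s h]

theorem pvDictOf_getD (s : List Char) (h : s.Nodup) (c : Char) (hc : c ∈ s) :
    (pvDictOf s).getD c 0 = (s.idxOf c : Int) := by
  apply PySem.Dict.getD_of_mem_items
  · rw [pvDictOf_items s h]
    refine List.mem_map.mpr ⟨((s.idxOf c : Int), c), ?_, rfl⟩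
    rw [PySem.List.mem_enumerate_iff]
    exact ⟨s.idxOf c, List.idxOf_lt_length_of_mem hc, by simp [List.getElem_idxOf]⟩
  · rw [pvDictOf_keys s h]; exact h

theorem pvDictOf_append (s : List Char) (c : Char) :
    pvDictOf (s ++ [c]) = (pvDictOf s).insert c (s.length : Int) := by
  unfold pvDictOf
  rw [PySem.List.enumerate_append]
  show (((PySem.List.enumerate s 0 ++ PySem.List.enumerate [c] (0 + (s.length:Int))).map
      (fun p => (p.2, p.1))).foldl (fun d p => d.insert p.1 p.2) PySem.Dict.empty) = _
  rw [List.map_append, List.foldl_append]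
  simp [PySem.List.enumerate]
  rfl

-- the chunks A emits, parameterised by the letters seen so far
def pvChunks : List Char → List Char → List String
  | [], _ => []
  | c :: cs, s =>
    if PySem.Chars.isalpha c then
      PySem.Int.toStr ((PySem.Set.add s c).idxOf c) :: pvChunks cs (PySem.Set.add s c)
    else
      String.ofList [c] :: pvChunks cs s

theorem pvFoldA (l : List Char) : ∀ (pat : List String) (s : List Char), s.Nodup →
    (l.foldl pvStepA (pat, pvDictOf s, (s.length : Int))).1 = pat ++ pvChunks l s := by
  induction l with
  | nil => intro pat s h; simp [pvChunks]
  | cons c cs ih =>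
    intro pat s h
    by_cases ha : PySem.Chars.isalpha c = true
    · by_cases hm : c ∈ s
      · have hadd : PySem.Set.add s c = s := PySem.Set.add_of_mem hm
        have hstep : pvStepA (pat, pvDictOf s, (s.length : Int)) c
            = (pat ++ [PySem.Int.toStr ((pvDictOf s).getD c 0)], pvDictOf s, (s.length : Int)) := by
          simp [pvStepA, ha, pvDictOf_contains s h, hm]
        rw [List.foldl_cons, hstep, ih _ s h, pvChunks]
        rw [pvDictOf_getD s h c hm]
        simp [ha, hadd]
      · have hadd : PySem.Set.add s c = s ++ [c] := PySem.Set.add_of_not_mem hm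
        have hstep : pvStepA (pat, pvDictOf s, (s.length : Int)) c
            = (pat ++ [PySem.Int.toStr ((s.length : Int))], pvDictOf (s ++ [c]), ((s ++ [c]).length : Int)) := by
          simp only [pvStepA, ha, if_true, pvDictOf_contains s h, hm, decide_false,
            Bool.false_eq_true, if_false, pvDictOf_append]
          simp [PySem.Dict.getD_insert_self]
        have hnd : (s ++ [c]).Nodup := by
          simp only [List.nodup_append, List.nodup_singleton, h, true_and]
          intro a ha' b hb heq
          simp only [List.mem_singleton] at hb
          rw [heq, hb] at ha'
          exact hm ha'
        rw [List.foldl_cons, hstep, ih _ _ hnd, pvChunks]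
        have hidx : (s ++ [c]).idxOf c = s.length := by
          rw [List.idxOf_append]; simp [hm]
        simp [ha, hadd, hidx]
    · have hstep : pvStepA (pat, pvDictOf s, (s.length : Int)) c
          = (pat ++ [String.ofList [c]], pvDictOf s, (s.length : Int)) := by
        simp [pvStepA, ha]
      rw [List.foldl_cons, hstep, ih _ s h, pvChunks]
      simp [ha]

theorem pvPrefix_foldl_add (l : List Char) : ∀ (s : List Char),
    s <+: l.foldl PySem.Set.add s := by
  induction l with
  | nil => intro s; exact List.prefix_refl s
  | cons c cs ih =>
    intro s
    refine List.IsPrefix.trans ?_ (ih (PySem.Set.add s c))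
    rw [PySem.Set.add_eq_ite]
    split
    · exact List.prefix_refl s
    · exact ⟨[c], rfl⟩

theorem pvChunks_eq (l : List Char) : ∀ (s : List Char), s.Nodup →
    pvChunks l s = l.map (fun c =>
      if PySem.Chars.isalpha c then
        PySem.Int.toStr ((((l.filter PySem.Chars.isalpha).foldl PySem.Set.add s).idxOf c : Nat) : Int)
      else String.ofList [c]) := by
  induction l with
  | nil => intro s h; rfl
  | cons c cs ih =>
    intro s h
    by_cases ha : PySem.Chars.isalpha c = true
    · have hnd : (PySem.Set.add s c).Nodup := PySem.Set.nodup_add s c h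
      have hpre : PySem.Set.add s c <+: (cs.filter PySem.Chars.isalpha).foldl PySem.Set.add (PySem.Set.add s c) :=
        pvPrefix_foldl_add _ _
      obtain ⟨t, ht⟩ := hpre
      have hmem : c ∈ PySem.Set.add s c := (PySem.Set.mem_add s c c).mpr (Or.inr rfl)
      have hidx : ((cs.filter PySem.Chars.isalpha).foldl PySem.Set.add (PySem.Set.add s c)).idxOf c
          = (PySem.Set.add s c).idxOf c := by
        rw [← ht, List.idxOf_append_of_mem hmem]
      rw [pvChunks, ih _ hnd]
      simp only [List.map_cons, List.filter_cons, ha, if_true, List.foldl_cons, hidx]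
    · rw [pvChunks, ih _ h]
      simp only [List.map_cons, List.filter_cons, ha]
      simp

-- B's letter_id, characterised: for an alphabetic c occurring in l and not yet in 'seen',
-- it returns the index of c in the seen-set accumulated over all letters of l
theorem pvLetterId_eq (c : Char) (ha : PySem.Chars.isalpha c = true) (l : List Char) :
    ∀ (seen : List Char), c ∉ seen → c ∈ l →
    pvLetterId c l seen
      = some ((((l.filter PySem.Chars.isalpha).foldl PySem.Set.add seen).idxOf c : Nat) : Int) := by
  induction l with
  | nil => intro seen _ hc; exact absurd hc (List.not_mem_nil)
  | cons x xs ih =>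
    intro seen hns hc
    by_cases hx : x = c
    · subst hx
      have hadd : PySem.Set.add seen x = seen ++ [x] := PySem.Set.add_of_not_mem hns
      have hpre : PySem.Set.add seen x <+: (xs.filter PySem.Chars.isalpha).foldl PySem.Set.add (PySem.Set.add seen x) :=
        pvPrefix_foldl_add _ _
      obtain ⟨t, ht⟩ := hpre
      have hmem : x ∈ PySem.Set.add seen x := (PySem.Set.mem_add seen x x).mpr (Or.inr rfl)
      have hidx : ((xs.filter PySem.Chars.isalpha).foldl PySem.Set.add (PySem.Set.add seen x)).idxOf x
          = seen.length := by
        rw [← ht, List.idxOf_append_of_mem hmem, hadd, List.idxOf_append]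
        simp [hns]
      rw [pvLetterId]
      simp only [List.filter_cons, ha, if_true, List.foldl_cons, hidx]
      simp [PySem.Set.len, pysem]
    · have hc' : c ∈ xs := by
        rcases List.mem_cons.mp hc with h | h
        · exact absurd h.symm hx
        · exact h
      by_cases hxa : PySem.Chars.isalpha x = true
      · have hns' : c ∉ PySem.Set.add seen x := by
          rw [PySem.Set.mem_add]
          rintro (h | h)
          · exact hns h
          · exact hx h.symm
        rw [pvLetterId]
        simp only [if_neg hx, hxa, if_true, List.filter_cons, List.foldl_cons]
        exact ih _ hns' hc'
      · rw [pvLetterId]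
        simp only [if_neg hx, hxa, Bool.false_eq_true, if_false, List.filter_cons]
        exact ih _ hns hc'

theorem pvCpm_eq (text : String) : create_pattern_mask text = create_pattern_mask_alt text := by
  unfold create_pattern_mask create_pattern_mask_alt
  have hA : (text.toList.foldl pvStepA ([], PySem.Dict.empty, 0)).1 = pvChunks text.toList [] := by
    have h := pvFoldA text.toList [] [] List.nodup_nil
    rw [List.nil_append] at h
    exact h
  show PySem.Str.join "" (text.toList.foldl pvStepA ([], PySem.Dict.empty, 0)).1 = _
  rw [hA, pvChunks_eq text.toList [] List.nodup_nil]
  congr 1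
  apply List.map_congr_left
  intro c hc
  by_cases ha : PySem.Chars.isalpha c = true
  · simp only [ha, if_true]
    rw [show (PySem.Set.empty : PySem.Set Char) = [] from rfl,
      pvLetterId_eq c ha text.toList [] (List.not_mem_nil) hc]
    rfl
  · simp [ha]

-- ===== VERDICT (by name: the statement is the Claim_ definition above) =====
theorem create_pattern_mask_spec : Claim_equal_create_pattern_mask := by
  intro text _
  exact pvCpm_eq text
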